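-- pv_equiv track=rewrite | github.com/qlqlqlr/TIL | pythonProject9/beakjoon_2644.py | dfs
-- ===== SOURCE A (Python) =====
-- def dfs(n, N, adj_m, G):
--     stack = []
--     visited = [0] * (N + 1)
--     visited[n] = 1
--     cnt = 0
--     while True:
--         for w in range(1, N+1):
--             if adj_m[n][w] == 1 and visited[w] == 0:
--                 stack.append(n)
--                 n = w
--                 cnt += 1
--                 visited[n] = 1
--                 if n == G:
--                     return cnt
--                 break
--         else:
--             if stack:
--                 n = stack.pop()
--                 cnt -= 1
--             else:
--                 return -1
--
--     return cnt
-- ===== SOURCE B (Python) =====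
-- def dfs(n, N, adj_m, G):
--     visited = [0] * (N + 1)
--     visited[n] = 1
--
--     def go(u, cnt):
--         for w in range(1, N + 1):
--             if adj_m[u][w] == 1 and visited[w] == 0:
--                 visited[w] = 1
--                 if w == G:
--                     return cnt + 1
--                 r = go(w, cnt + 1)
--                 if r != -1:
--                     return r
--         return -1
--
--     return go(n, 0)
-- ===== Notes on version B (the rewrite author's own statement) =====
-- stated objective: alternative
-- what changed: A's iterative DFS with an explicit stack, global cnt that is incremented/decremented and a full neighbour re-scan from 1 after every backtrack is replaced by a recursive helper go(u, cnt) that propagates the first non -1 result and simply resumes its own for-loop after a failed subtree.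
-- outside the precondition, e.g. on dfs(1, 1, [[0, 1], [1, 0], [7]], 1): A returns -1, B returns -1
import Mathlib
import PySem

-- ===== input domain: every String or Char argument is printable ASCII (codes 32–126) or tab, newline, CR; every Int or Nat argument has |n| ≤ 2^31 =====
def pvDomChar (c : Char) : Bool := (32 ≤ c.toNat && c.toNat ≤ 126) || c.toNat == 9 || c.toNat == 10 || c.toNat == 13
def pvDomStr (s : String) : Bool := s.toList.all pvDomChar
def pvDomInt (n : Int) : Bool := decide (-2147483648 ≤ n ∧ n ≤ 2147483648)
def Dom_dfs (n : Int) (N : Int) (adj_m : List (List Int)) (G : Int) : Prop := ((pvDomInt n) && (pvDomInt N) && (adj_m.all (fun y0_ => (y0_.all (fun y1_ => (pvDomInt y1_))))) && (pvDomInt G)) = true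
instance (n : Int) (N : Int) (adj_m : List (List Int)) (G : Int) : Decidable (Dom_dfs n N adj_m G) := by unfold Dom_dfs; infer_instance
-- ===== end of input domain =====

-- B replaces A's explicit-stack while-loop DFS by a recursive helper that resumes the
-- neighbour scan after a failed subtree instead of re-scanning from 1 (objective: alternative).

-- number of unvisited slots: termination measure for both ports
def countZeros (v : List Int) : Nat := v.countP (fun x => x == 0)

theorem countZeros_set_lt : ∀ (v : List Int) (k : Nat), v[k]? = some 0 →
    countZeros (v.set k 1) < countZeros v := by
  intro v
  induction v with
  | nil => intro k h; simp at h
  | cons x xs ih =>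
    intro k h
    cases k with
    | zero =>
      simp at h
      subst h
      simp [countZeros]
    | succ m =>
      simp at h
      have := ih m h
      simp only [countZeros, List.countP_cons] at this ⊢
      simp only [List.set_cons_succ, List.countP_cons]
      omega

theorem countZeros_set_le : ∀ (v : List Int) (k : Nat),
    countZeros (v.set k 1) ≤ countZeros v := by
  intro v
  induction v with
  | nil => intro k; simp [countZeros]
  | cons x xs ih =>
    intro k
    cases k with
    | zero =>
      simp only [List.set_cons_zero, countZeros, List.countP_cons]
      norm_num
    | succ m =>
      have := ih m
      simp only [countZeros, List.countP_cons] at this ⊢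
      simp only [List.set_cons_succ, List.countP_cons]
      omega

-- Python's `visited[i] = 1` can only shrink the number of zero slots
theorem countZeros_pySetD_lt {v : List Int} {i : Int}
    (h : PySem.List.pyGet? v i = some 0) :
    countZeros (PySem.List.pySetD v i 1) < countZeros v := by
  unfold PySem.List.pyGet? at h
  unfold PySem.List.pySetD PySem.List.pySet?
  cases hk : PySem.List.pyIdx? v.length i with
  | none => rw [hk] at h; simp at h
  | some k =>
    rw [hk] at h
    simp only [Option.bind_some] at h
    simp only [Option.map_some, Option.getD_some]
    exact countZeros_set_lt v k h

-- the visited list only ever gains marks: same length, no fewer marks, no slot un-marked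
def Mono (v v' : List Int) : Prop :=
  v'.length = v.length ∧ countZeros v' ≤ countZeros v ∧
    ∀ j : Int, PySem.List.pyGet? v j ≠ some 0 → PySem.List.pyGet? v' j ≠ some 0

theorem mono_refl (v : List Int) : Mono v v := ⟨rfl, le_refl _, fun _ h => h⟩

theorem mono_trans {v1 v2 v3 : List Int} (h1 : Mono v1 v2) (h2 : Mono v2 v3) : Mono v1 v3 :=
  ⟨h2.1.trans h1.1, h2.2.1.trans h1.2.1, fun j hj => h2.2.2 j (h1.2.2 j hj)⟩

theorem mono_pySetD (v : List Int) (i : Int) : Mono v (PySem.List.pySetD v i 1) := by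
  unfold PySem.List.pySetD PySem.List.pySet?
  cases hk : PySem.List.pyIdx? v.length i with
  | none => exact ⟨rfl, le_refl _, fun _ h => h⟩
  | some k =>
    simp only [Option.map_some, Option.getD_some]
    refine ⟨List.length_set .., countZeros_set_le v k, ?_⟩
    intro j hj
    unfold PySem.List.pyGet? at hj ⊢
    rw [List.length_set]
    cases hm : PySem.List.pyIdx? v.length j with
    | none => simp
    | some m =>
      rw [hm] at hj
      simp only [Option.bind_some] at hj ⊢
      rw [List.getElem?_set]
      split
      · split <;> simp
      · exact hj

-- ===== PORT A =====
-- A's inner `for w in range(1, N+1): if adj_m[n][w] == 1 and visited[w] == 0: … break / else:`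
-- is the first w in the range passing the test (pyGet? = none only where Python raises; Pre_ excludes that)
def dfsFind (adj : List (List Int)) (u : Int) (v : List Int) : List Int → Option Int
  | [] => none
  | w :: ws =>
    if ((PySem.List.pyGet? adj u).bind (fun r => PySem.List.pyGet? r w)) = some 1 ∧
        PySem.List.pyGet? v w = some 0 then some w
    else dfsFind adj u v ws

theorem dfsFind_some {adj : List (List Int)} {u : Int} {v : List Int} {ws : List Int} {w : Int}
    (h : dfsFind adj u v ws = some w) :
    w ∈ ws ∧ ((PySem.List.pyGet? adj u).bind (fun r => PySem.List.pyGet? r w)) = some 1 ∧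
      PySem.List.pyGet? v w = some 0 := by
  induction ws with
  | nil => simp [dfsFind] at h
  | cons x xs ih =>
    rw [dfsFind] at h
    split at h
    · cases h; exact ⟨List.mem_cons_self, by assumption⟩
    · rcases ih h with ⟨h1, h2⟩; exact ⟨List.mem_cons_of_mem _ h1, h2⟩

-- A's `while True` loop over the state (n, stack, visited, cnt); terminates because each step
-- either marks a fresh node (countZeros drops) or pops the stack
def dfsLoop (adj : List (List Int)) (N G : Int) (n : Int) (stack : List Int)
    (v : List Int) (cnt : Int) : Int :=
  match h : dfsFind adj n v (PySem.List.pyRange 1 (N + 1) 1) with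
  | some w =>
    let v' := PySem.List.pySetD v w 1
    if w = G then cnt + 1
    else dfsLoop adj N G w (n :: stack) v' (cnt + 1)
  | none =>
    match stack with
    | s :: rest => dfsLoop adj N G s rest v (cnt - 1)
    | [] => -1
termination_by (countZeros v, stack.length)
decreasing_by
  · exact Prod.Lex.left _ _ (countZeros_pySetD_lt (dfsFind_some h).2.2)
  · exact Prod.Lex.right _ (Nat.lt_succ_self _)

def dfs (n : Int) (N : Int) (adj_m : List (List Int)) (G : Int) : Int :=
  let visited := List.replicate (N + 1).toNat 0    -- [0] * (N + 1)
  let visited := PySem.List.pySetD visited n 1     -- visited[n] = 1 (exact inside Pre_; Python raises where pySet? = none)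
  dfsLoop adj_m N G n [] visited 0

-- ===== PORT B =====
-- Source B's `go(u, cnt)` with the loop's remaining range `ws` explicit and the mutated closure
-- variable `visited` threaded through; the subtype on the result is termination/invariant
-- scaffolding only (the computed list is exactly Source B's visited)
def goB (adj : List (List Int)) (N G : Int) :
    (ws : List Int) → (u cnt : Int) → (v : List Int) → Int × {v' : List Int // Mono v v'}
  | [], _, _, v => (-1, ⟨v, mono_refl v⟩)
  | w :: ws, u, cnt, v =>
    if hc : ((PySem.List.pyGet? adj u).bind (fun r => PySem.List.pyGet? r w)) = some 1 ∧
        PySem.List.pyGet? v w = some 0 then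
      let v' := PySem.List.pySetD v w 1
      if w = G then (cnt + 1, ⟨v', mono_pySetD v w⟩)
      else
        let res := goB adj N G (PySem.List.pyRange 1 (N + 1) 1) w (cnt + 1) v'
        if res.1 ≠ -1 then (res.1, ⟨res.2.val, mono_trans (mono_pySetD v w) res.2.property⟩)
        else
          let res2 := goB adj N G ws u cnt res.2.val
          (res2.1, ⟨res2.2.val,
            mono_trans (mono_trans (mono_pySetD v w) res.2.property) res2.2.property⟩)
    else goB adj N G ws u cnt v
termination_by ws _ _ v => (countZeros v, ws.length)
decreasing_by
  · exact Prod.Lex.left _ _ (countZeros_pySetD_lt hc.2)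
  · exact Prod.Lex.left _ _ (Nat.lt_of_le_of_lt res.2.property.2.1 (countZeros_pySetD_lt hc.2))
  · exact Prod.Lex.right _ (Nat.lt_succ_self _)

def dfs_alt (n : Int) (N : Int) (adj_m : List (List Int)) (G : Int) : Int :=
  let visited := List.replicate (N + 1).toNat 0    -- [0] * (N + 1)
  let visited := PySem.List.pySetD visited n 1     -- visited[n] = 1 (exact inside Pre_; Python raises where pySet? = none)
  (goB adj_m N G (PySem.List.pyRange 1 (N + 1) 1) n 0 visited).1

-- ===== PRECONDITION & SPEC =====
-- A raises IndexError when N < 0, when the start index n is outside Python's (wraparound)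
-- range of visited = [0]*(N+1), or when it reads a row/entry that is missing; Pre_ states the
-- natural well-formed shape: every row of the matrix has at least N+1 entries.  This is
-- slightly stronger than A's exact raising set: A can also return from a malformed matrix it
-- happens never to touch (e.g. it finds G, or fails, before reaching a short row); B returns
-- the same value on those inputs too, but the ports do not model them.
def Pre_dfs (n : Int) (N : Int) (adj_m : List (List Int)) (G : Int) : Prop :=
  0 ≤ N ∧ -(N + 1) ≤ n ∧ n ≤ N ∧ N + 1 ≤ (adj_m.length : Int) ∧
    ∀ row ∈ adj_m, N + 1 ≤ (row.length : Int)
instance (n : Int) (N : Int) (adj_m : List (List Int)) (G : Int) : Decidable (Pre_dfs n N adj_m G) := by unfold Pre_dfs; infer_instance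

def pvWitness_dfs : Int × Int × List (List Int) × Int :=
  (1, 3, [[0, 0, 0, 0], [0, 0, 1, 1], [0, 1, 0, 0], [0, 1, 0, 0]], 3)

def Spec_dfs (n : Int) (N : Int) (adj_m : List (List Int)) (G : Int) (out : Int) : Prop := out = dfs_alt n N adj_m G
instance (n : Int) (N : Int) (adj_m : List (List Int)) (G : Int) (out : Int) : Decidable (Spec_dfs n N adj_m G out) := by unfold Spec_dfs; infer_instance

-- ===== CLAIM (what is proved, stated in full; the proofs are below) =====
def Claim_equal_dfs : Prop := ∀ (n : Int) (N : Int) (adj_m : List (List Int)) (G : Int), Dom_dfs n N adj_m G → Pre_dfs n N adj_m G → Spec_dfs n N adj_m G (dfs n N adj_m G)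

-- ===== LEMMAS AND PROOFS =====

theorem pyGet?_pySetD_self {v : List Int} {i : Int}
    (h : PySem.List.pyGet? v i = some 0) :
    PySem.List.pyGet? (PySem.List.pySetD v i 1) i = some 1 := by
  unfold PySem.List.pyGet? at h ⊢
  unfold PySem.List.pySetD PySem.List.pySet?
  cases hk : PySem.List.pyIdx? v.length i with
  | none => rw [hk] at h; simp at h
  | some k =>
    rw [hk] at h
    simp only [Option.bind_some] at h
    have hlt : k < v.length := (List.getElem?_eq_some_iff.mp h).1
    simp only [Option.map_some, Option.getD_some, List.length_set, hk, Option.bind_some]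
    rw [List.getElem?_set]
    simp [hlt]

theorem dfsFind_append_fail {adj : List (List Int)} {u : Int} {v : List Int}
    {pre ws : List Int}
    (h : ∀ x ∈ pre, ¬(((PySem.List.pyGet? adj u).bind (fun r => PySem.List.pyGet? r x)) = some 1 ∧
      PySem.List.pyGet? v x = some 0)) :
    dfsFind adj u v (pre ++ ws) = dfsFind adj u v ws := by
  induction pre with
  | nil => rfl
  | cons x xs ih =>
    rw [List.cons_append, dfsFind, if_neg (h x List.mem_cons_self)]
    exact ih (fun y hy => h y (List.mem_cons_of_mem _ hy))

-- restart-style recursive DFS: like Source B's go, but after a failed subtree it re-scans u's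
-- neighbours from 1 (exactly what A does after a pop); bridge between the two ports
def goFull (adj : List (List Int)) (N G : Int) (u cnt : Int) (v : List Int) :
    Int × {v' : List Int // Mono v v'} :=
  match h : dfsFind adj u v (PySem.List.pyRange 1 (N + 1) 1) with
  | none => (-1, ⟨v, mono_refl v⟩)
  | some w =>
    let v' := PySem.List.pySetD v w 1
    if w = G then (cnt + 1, ⟨v', mono_pySetD v w⟩)
    else
      let res := goFull adj N G w (cnt + 1) v'
      if res.1 ≠ -1 then (res.1, ⟨res.2.val, mono_trans (mono_pySetD v w) res.2.property⟩)
      else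
        let res2 := goFull adj N G u cnt res.2.val
        (res2.1, ⟨res2.2.val,
          mono_trans (mono_trans (mono_pySetD v w) res.2.property) res2.2.property⟩)
termination_by countZeros v
decreasing_by
  · exact countZeros_pySetD_lt (dfsFind_some h).2.2
  · exact Nat.lt_of_le_of_lt res.2.property.2.1 (countZeros_pySetD_lt (dfsFind_some h).2.2)

-- what A's loop does with the rest of the stack once the current subtree has been fully explored
def contFull (adj : List (List Int)) (N G : Int) : List Int → Int → Int × List Int → Int
  | stack, cnt, rv =>
    if rv.1 ≠ -1 then rv.1
    else
      match stack with
      | [] => -1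
      | s :: rest =>
        let res := goFull adj N G s (cnt - 1) rv.2
        contFull adj N G rest (cnt - 1) (res.1, res.2.val)

theorem goFull_none {adj : List (List Int)} {N G u cnt : Int} {v : List Int}
    (h : dfsFind adj u v (PySem.List.pyRange 1 (N + 1) 1) = none) :
    (goFull adj N G u cnt v).1 = -1 ∧ (goFull adj N G u cnt v).2.val = v := by
  rw [goFull.eq_def]
  split <;> rename_i heq
  · exact ⟨rfl, rfl⟩
  · rw [h] at heq; cases heq

theorem goFull_someG {adj : List (List Int)} {N G u cnt : Int} {v : List Int} {w : Int}
    (h : dfsFind adj u v (PySem.List.pyRange 1 (N + 1) 1) = some w) (hG : w = G) :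
    (goFull adj N G u cnt v).1 = cnt + 1 ∧
      (goFull adj N G u cnt v).2.val = PySem.List.pySetD v w 1 := by
  rw [goFull.eq_def]
  split <;> rename_i heq
  · rw [h] at heq; cases heq
  · rw [h] at heq; cases heq; simp [hG]

theorem goFull_someNe {adj : List (List Int)} {N G u cnt : Int} {v : List Int} {w : Int}
    (h : dfsFind adj u v (PySem.List.pyRange 1 (N + 1) 1) = some w) (hG : ¬w = G) :
    (goFull adj N G u cnt v).1 =
      (if (goFull adj N G w (cnt + 1) (PySem.List.pySetD v w 1)).1 ≠ -1 then
        (goFull adj N G w (cnt + 1) (PySem.List.pySetD v w 1)).1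
      else (goFull adj N G u cnt
        ((goFull adj N G w (cnt + 1) (PySem.List.pySetD v w 1)).2.val)).1) ∧
    (goFull adj N G u cnt v).2.val =
      (if (goFull adj N G w (cnt + 1) (PySem.List.pySetD v w 1)).1 ≠ -1 then
        (goFull adj N G w (cnt + 1) (PySem.List.pySetD v w 1)).2.val
      else (goFull adj N G u cnt
        ((goFull adj N G w (cnt + 1) (PySem.List.pySetD v w 1)).2.val)).2.val) := by
  rw [goFull.eq_def]
  split <;> rename_i heq
  · rw [h] at heq; cases heq
  · rw [h] at heq; cases heq
    simp only [if_neg hG]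
    split <;> exact ⟨rfl, rfl⟩

theorem dfsLoop_none_nil {adj : List (List Int)} {N G n cnt : Int} {v : List Int}
    (h : dfsFind adj n v (PySem.List.pyRange 1 (N + 1) 1) = none) :
    dfsLoop adj N G n [] v cnt = -1 := by
  rw [dfsLoop.eq_def]
  split <;> rename_i heq
  · rw [h] at heq; cases heq
  · rfl

theorem dfsLoop_none_cons {adj : List (List Int)} {N G n cnt : Int} {v : List Int}
    {s : Int} {rest : List Int}
    (h : dfsFind adj n v (PySem.List.pyRange 1 (N + 1) 1) = none) :
    dfsLoop adj N G n (s :: rest) v cnt = dfsLoop adj N G s rest v (cnt - 1) := by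
  rw [dfsLoop.eq_def]
  split <;> rename_i heq
  · rw [h] at heq; cases heq
  · rfl

theorem dfsLoop_someG {adj : List (List Int)} {N G n cnt : Int} {v : List Int}
    {stack : List Int} {w : Int}
    (h : dfsFind adj n v (PySem.List.pyRange 1 (N + 1) 1) = some w) (hG : w = G) :
    dfsLoop adj N G n stack v cnt = cnt + 1 := by
  rw [dfsLoop.eq_def]
  split <;> rename_i heq
  · rw [h] at heq; cases heq; simp [hG]
  · rw [h] at heq; cases heq

theorem dfsLoop_someNe {adj : List (List Int)} {N G n cnt : Int} {v : List Int}
    {stack : List Int} {w : Int}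
    (h : dfsFind adj n v (PySem.List.pyRange 1 (N + 1) 1) = some w) (hG : ¬w = G) :
    dfsLoop adj N G n stack v cnt =
      dfsLoop adj N G w (n :: stack) (PySem.List.pySetD v w 1) (cnt + 1) := by
  rw [dfsLoop.eq_def]
  split <;> rename_i heq
  · rw [h] at heq; cases heq; simp [hG]
  · rw [h] at heq; cases heq

theorem contFull_pos (adj : List (List Int)) (N G : Int) (stack : List Int) (cnt : Int)
    (rv : Int × List Int) (h : ¬rv.1 = -1) : contFull adj N G stack cnt rv = rv.1 := by
  rw [contFull.eq_def]; simp [h]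

theorem contFull_neg_nil (adj : List (List Int)) (N G : Int) (cnt : Int)
    (rv : Int × List Int) (h : rv.1 = -1) : contFull adj N G [] cnt rv = -1 := by
  rw [contFull.eq_def]; simp [h]

theorem contFull_neg_cons (adj : List (List Int)) (N G : Int) (s : Int) (rest : List Int)
    (cnt : Int) (rv : Int × List Int) (h : rv.1 = -1) :
    contFull adj N G (s :: rest) cnt rv =
      contFull adj N G rest (cnt - 1)
        ((goFull adj N G s (cnt - 1) rv.2).1, (goFull adj N G s (cnt - 1) rv.2).2.val) := by
  rw [contFull.eq_def]; simp [h]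

-- A's stack machine = goFull wrapped in the pending-stack continuation
theorem dfsLoop_eq_contFull (adj : List (List Int)) (N G : Int) :
    ∀ (n : Int) (stack : List Int) (v : List Int) (cnt : Int),
      cnt = (stack.length : Int) →
      dfsLoop adj N G n stack v cnt =
        contFull adj N G stack cnt
          ((goFull adj N G n cnt v).1, (goFull adj N G n cnt v).2.val) := by
  intro n stack v cnt
  induction n, stack, v, cnt using dfsLoop.induct adj N G with
  | case1 a b c d e =>
    intro hc
    rw [dfsLoop_someG e rfl, (goFull_someG e rfl).1, (goFull_someG e rfl).2]
    rw [contFull_pos adj N G b d _ (by simp; omega)]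
  | case2 a b c d e f g =>
    rename_i hne ih
    intro hc
    rw [dfsLoop_someNe f hne]
    rw [ih (by simp; omega)]
    have hd : d + 1 - 1 = d := by omega
    by_cases hr : (goFull adj N G e (d + 1) (PySem.List.pySetD c e 1)).1 = -1
    · rw [contFull_neg_cons adj N G a b (d + 1) _ hr, hd]
      rw [(goFull_someNe f hne).1, (goFull_someNe f hne).2]
      rw [if_neg (by simpa using hr), if_neg (by simpa using hr)]
    · rw [contFull_pos adj N G (a :: b) (d + 1) _ hr]
      rw [(goFull_someNe f hne).1, (goFull_someNe f hne).2]
      rw [if_pos hr, if_pos hr]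
      rw [contFull_pos adj N G b d _ hr]
  | case3 a b c d e f g =>
    intro hc
    rw [dfsLoop_none_cons d]
    rw [g (by simp at hc ⊢; omega)]
    rw [contFull_neg_cons adj N G e f c _ (goFull_none d).1]
    rw [(goFull_none d).1, (goFull_none d).2]
  | case4 a b c d =>
    intro hc
    rw [dfsLoop_none_nil d]
    rw [contFull_neg_nil adj N G c _ (goFull_none d).1]

-- resume-style scan (goB) = restart-style scan (goFull), given that the already-scanned
-- prefix of the range has no edge to an unvisited node
theorem dfsFind_cons_true {adj : List (List Int)} {u : Int} {v : List Int} {w : Int}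
    {ws : List Int}
    (hc : ((PySem.List.pyGet? adj u).bind (fun r => PySem.List.pyGet? r w)) = some 1 ∧
      PySem.List.pyGet? v w = some 0) :
    dfsFind adj u v (w :: ws) = some w := by
  rw [dfsFind, if_pos hc]

theorem goB_nil {adj : List (List Int)} {N G u cnt : Int} {v : List Int} :
    (goB adj N G [] u cnt v).1 = -1 ∧ (goB adj N G [] u cnt v).2.val = v := by
  rw [goB]; exact ⟨rfl, rfl⟩

theorem goB_cons_fail {adj : List (List Int)} {N G u cnt : Int} {v : List Int} {w : Int}
    {ws : List Int}
    (hc : ¬(((PySem.List.pyGet? adj u).bind (fun r => PySem.List.pyGet? r w)) = some 1 ∧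
      PySem.List.pyGet? v w = some 0)) :
    (goB adj N G (w :: ws) u cnt v).1 = (goB adj N G ws u cnt v).1 ∧
      (goB adj N G (w :: ws) u cnt v).2.val = (goB adj N G ws u cnt v).2.val := by
  rw [goB, dif_neg hc]; exact ⟨rfl, rfl⟩

theorem goB_cons_G {adj : List (List Int)} {N G u cnt : Int} {v : List Int} {w : Int}
    {ws : List Int}
    (hc : ((PySem.List.pyGet? adj u).bind (fun r => PySem.List.pyGet? r w)) = some 1 ∧
      PySem.List.pyGet? v w = some 0) (hG : w = G) :
    (goB adj N G (w :: ws) u cnt v).1 = cnt + 1 ∧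
      (goB adj N G (w :: ws) u cnt v).2.val = PySem.List.pySetD v w 1 := by
  rw [goB, dif_pos hc]
  simp only [if_pos hG]
  constructor <;> trivial

theorem goB_cons_ne_pos {adj : List (List Int)} {N G u cnt : Int} {v : List Int} {w : Int}
    {ws : List Int}
    (hc : ((PySem.List.pyGet? adj u).bind (fun r => PySem.List.pyGet? r w)) = some 1 ∧
      PySem.List.pyGet? v w = some 0) (hG : ¬w = G)
    (hr : (goB adj N G (PySem.List.pyRange 1 (N + 1) 1) w (cnt + 1)
      (PySem.List.pySetD v w 1)).1 ≠ -1) :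
    (goB adj N G (w :: ws) u cnt v).1 =
      (goB adj N G (PySem.List.pyRange 1 (N + 1) 1) w (cnt + 1) (PySem.List.pySetD v w 1)).1 ∧
    (goB adj N G (w :: ws) u cnt v).2.val =
      (goB adj N G (PySem.List.pyRange 1 (N + 1) 1) w (cnt + 1)
        (PySem.List.pySetD v w 1)).2.val := by
  rw [goB, dif_pos hc]
  simp only [if_neg hG, if_pos hr]
  constructor <;> trivial

theorem goB_cons_ne_neg {adj : List (List Int)} {N G u cnt : Int} {v : List Int} {w : Int}
    {ws : List Int}
    (hc : ((PySem.List.pyGet? adj u).bind (fun r => PySem.List.pyGet? r w)) = some 1 ∧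
      PySem.List.pyGet? v w = some 0) (hG : ¬w = G)
    (hr : ¬(goB adj N G (PySem.List.pyRange 1 (N + 1) 1) w (cnt + 1)
      (PySem.List.pySetD v w 1)).1 ≠ -1) :
    (goB adj N G (w :: ws) u cnt v).1 =
      (goB adj N G ws u cnt
        ((goB adj N G (PySem.List.pyRange 1 (N + 1) 1) w (cnt + 1)
          (PySem.List.pySetD v w 1)).2.val)).1 ∧
    (goB adj N G (w :: ws) u cnt v).2.val =
      (goB adj N G ws u cnt
        ((goB adj N G (PySem.List.pyRange 1 (N + 1) 1) w (cnt + 1)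
          (PySem.List.pySetD v w 1)).2.val)).2.val := by
  rw [goB, dif_pos hc]
  simp only [if_neg hG, if_neg hr]
  constructor <;> trivial

-- after marking w and exploring its (failed) subtree the visited list has only grown,
-- so neither the already-scanned prefix nor w itself can pass the scan test again
theorem inv_extend {adj : List (List Int)} {u : Int} {v v' : List Int} {w : Int}
    {pre : List Int}
    (hpre : ∀ x ∈ pre, ¬(((PySem.List.pyGet? adj u).bind (fun r => PySem.List.pyGet? r x)) = some 1 ∧
      PySem.List.pyGet? v x = some 0))
    (hz : PySem.List.pyGet? v w = some 0)
    (hm : Mono (PySem.List.pySetD v w 1) v') :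
    ∀ x ∈ pre ++ [w], ¬(((PySem.List.pyGet? adj u).bind (fun r => PySem.List.pyGet? r x)) = some 1 ∧
      PySem.List.pyGet? v' x = some 0) := by
  have hmono : Mono v v' := mono_trans (mono_pySetD v w) hm
  intro x hx
  rcases List.mem_append.mp hx with hx | hx
  · rintro ⟨he, hz'⟩
    by_cases hvz : PySem.List.pyGet? v x = some 0
    · exact hpre x hx ⟨he, hvz⟩
    · exact hmono.2.2 x hvz hz'
  · rcases List.mem_singleton.mp hx with rfl
    rintro ⟨-, hz'⟩
    exact hm.2.2 x (by rw [pyGet?_pySetD_self hz]; simp) hz'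

theorem goB_eq_goFull (adj : List (List Int)) (N G : Int) :
    ∀ (ws : List Int) (u cnt : Int) (v : List Int) (pre : List Int),
      PySem.List.pyRange 1 (N + 1) 1 = pre ++ ws →
      (∀ x ∈ pre, ¬(((PySem.List.pyGet? adj u).bind (fun r => PySem.List.pyGet? r x)) = some 1 ∧
        PySem.List.pyGet? v x = some 0)) →
      (goB adj N G ws u cnt v).1 = (goFull adj N G u cnt v).1 ∧
        (goB adj N G ws u cnt v).2.val = (goFull adj N G u cnt v).2.val := by
  intro ws u cnt v
  induction ws, u, cnt, v using goB.induct adj N G with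
  | case1 u cnt v =>
    intro pre hsplit hinv
    have hfind : dfsFind adj u v (PySem.List.pyRange 1 (N + 1) 1) = none := by
      rw [hsplit, dfsFind_append_fail hinv]; rfl
    rw [goB_nil.1, goB_nil.2, (goFull_none hfind).1, (goFull_none hfind).2]
    exact ⟨rfl, rfl⟩
  | case2 ws u cnt v hc =>
    intro pre hsplit hinv
    have hfind : dfsFind adj u v (PySem.List.pyRange 1 (N + 1) 1) = some G := by
      rw [hsplit, dfsFind_append_fail hinv, dfsFind_cons_true hc]
    rw [(goB_cons_G hc rfl).1, (goB_cons_G hc rfl).2,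
      (goFull_someG hfind rfl).1, (goFull_someG hfind rfl).2]
    exact ⟨rfl, rfl⟩
  | case3 w ws u cnt v hc v2 hG =>
    rename_i res hr ihChild ihChild'
    intro pre hsplit hinv
    have hfind : dfsFind adj u v (PySem.List.pyRange 1 (N + 1) 1) = some w := by
      rw [hsplit, dfsFind_append_fail hinv, dfsFind_cons_true hc]
    have hchild := ihChild' [] (by simp) (by simp)
    have hr' : (goB adj N G (PySem.List.pyRange 1 (N + 1) 1) w (cnt + 1)
        (PySem.List.pySetD v w 1)).1 ≠ -1 := hr
    rw [(goB_cons_ne_pos hc hG hr').1, (goB_cons_ne_pos hc hG hr').2,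
      (goFull_someNe hfind hG).1, (goFull_someNe hfind hG).2]
    rw [← hchild.1, ← hchild.2]
    rw [if_pos hr', if_pos hr']
    exact ⟨rfl, rfl⟩
  | case4 w ws u cnt v hc v2 hG =>
    rename_i res hr ihC1 ihC2 ihT1 ihT2
    intro pre hsplit hinv
    have hfind : dfsFind adj u v (PySem.List.pyRange 1 (N + 1) 1) = some w := by
      rw [hsplit, dfsFind_append_fail hinv, dfsFind_cons_true hc]
    have hchild := ihC2 [] (by simp) (by simp)
    have hr' : ¬(goB adj N G (PySem.List.pyRange 1 (N + 1) 1) w (cnt + 1)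
        (PySem.List.pySetD v w 1)).1 ≠ -1 := hr
    have hsplit' : PySem.List.pyRange 1 (N + 1) 1 = (pre ++ [w]) ++ ws := by
      rw [hsplit]; simp
    have hinv' := inv_extend hinv hc.2
      (goB adj N G (PySem.List.pyRange 1 (N + 1) 1) w (cnt + 1)
        (PySem.List.pySetD v w 1)).2.property
    have htail := ihT2 (pre ++ [w]) hsplit' hinv'
    rw [(goB_cons_ne_neg hc hG hr').1, (goB_cons_ne_neg hc hG hr').2,
      (goFull_someNe hfind hG).1, (goFull_someNe hfind hG).2]
    rw [← hchild.1, ← hchild.2]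
    rw [if_neg hr', if_neg hr']
    exact htail
  | case5 w ws u cnt v hc ih =>
    intro pre hsplit hinv
    have hsplit' : PySem.List.pyRange 1 (N + 1) 1 = (pre ++ [w]) ++ ws := by
      rw [hsplit]; simp
    have hinv' : ∀ x ∈ pre ++ [w],
        ¬(((PySem.List.pyGet? adj u).bind (fun r => PySem.List.pyGet? r x)) = some 1 ∧
          PySem.List.pyGet? v x = some 0) := by
      intro x hx
      rcases List.mem_append.mp hx with hx | hx
      · exact hinv x hx
      · rcases List.mem_singleton.mp hx with rfl; exact hc
    rw [(goB_cons_fail hc).1, (goB_cons_fail hc).2]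
    exact ih (pre ++ [w]) hsplit' hinv'

-- ===== VERDICT (by name: the statement is the Claim_ definition above) =====
theorem dfs_spec : Claim_equal_dfs := by
  intro n N adj_m G _dom _pre
  unfold Spec_dfs dfs dfs_alt
  have h1 := dfsLoop_eq_contFull adj_m N G n [] (PySem.List.pySetD (List.replicate (N + 1).toNat 0) n 1) 0 (by simp)
  have h2 := goB_eq_goFull adj_m N G (PySem.List.pyRange 1 (N + 1) 1) n 0 (PySem.List.pySetD (List.replicate (N + 1).toNat 0) n 1) [] (by simp) (by simp)
  rw [h1, h2.1]
  rw [contFull]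
  split
  · rfl
  · simp_all
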